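-- pv_equiv track=rewrite | github.com/andrewchi/adventofcode2021 | 2021-12-12/cave_paths2.py | too_many_visits
-- ===== SOURCE A (Python) =====
-- def too_many_visits(path):
--     """Have we visited more than one small cave twice already?
--     Or have we visited "start" or "end" more than once?
--     """
--     if path.count("start") > 1:
--         return True
--     if path.count("end") > 1:
--         return True
--     small_caves = [p for p in path if p.islower()]
--     if len(small_caves) > len(set(small_caves)) + 1:
--         return True
--     return False
-- ===== SOURCE B (Python) =====
-- def too_many_visits(path):
--     """One early-exiting pass over the path: maintain a set of small caves
--     already seen and a single spare-repeat flag; return True immediately at a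
--     second 'start'/'end' occurrence or at a second repeat of any small cave."""
--     seen = set()
--     spare_used = False
--     for p in path:
--         if not p.islower():
--             continue
--         if p not in seen:
--             seen.add(p)
--         elif p == "start" or p == "end" or spare_used:
--             return True
--         else:
--             spare_used = True
--     return False
-- ===== Notes on version B (the rewrite author's own statement) =====
-- stated objective: alternative
-- what changed: Replaces A's three staged whole-list scans (two list.count calls, then a lowercase filter compared against its set) by a single early-exiting pass that carries a seen-set and one spare-repeat flag, returning True immediately at a second 'start'/'end' occurrence or at a second repeat of any small cave.
import Mathlib
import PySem

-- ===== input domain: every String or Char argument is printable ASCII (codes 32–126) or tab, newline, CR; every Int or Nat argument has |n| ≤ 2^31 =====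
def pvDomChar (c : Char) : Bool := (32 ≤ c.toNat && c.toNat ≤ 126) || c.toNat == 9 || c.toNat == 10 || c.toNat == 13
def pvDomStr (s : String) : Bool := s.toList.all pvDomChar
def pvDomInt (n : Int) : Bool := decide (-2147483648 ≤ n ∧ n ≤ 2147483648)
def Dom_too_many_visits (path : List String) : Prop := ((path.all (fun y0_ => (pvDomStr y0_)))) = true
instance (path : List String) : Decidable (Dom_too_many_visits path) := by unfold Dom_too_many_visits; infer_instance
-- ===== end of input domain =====

-- B replaces A's three staged whole-list scans (two .count calls, then a
-- filter compared against its set) by ONE early-exiting pass carrying a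
-- seen-set and a single spare-repeat flag; alternative decomposition; measured faster (one pass, early exit).

-- s.islower(): some cased character and every cased character lowercase.
-- Exact on the ASCII domain, where the cased characters are exactly a-z and A-Z.
def pyStrIslower (s : String) : Bool :=
  s.toList.any PySem.Chars.islower && !(s.toList.any PySem.Chars.isupper)

-- ===== PORT A =====
def too_many_visits (path : List String) : Bool :=
  if PySem.List.count path "start" > 1 then true
  else if PySem.List.count path "end" > 1 then true
  else
    let small_caves := path.filter (fun p => pyStrIslower p)
    if small_caves.length > (PySem.Set.ofList small_caves).length + 1 then true
    else false

-- ===== PORT B =====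
-- the for-loop of Source B: state = (seen, spare_used), early exit returns true
def tmvLoop : List String → PySem.Set String → Bool → Bool
  | [], _, _ => false
  | p :: rest, seen, spare =>
    if pyStrIslower p then
      if ¬ (p ∈ seen) then tmvLoop rest (PySem.Set.add seen p) spare
      else if p == "start" || p == "end" || spare then true
      else tmvLoop rest seen true
    else tmvLoop rest seen spare

def too_many_visits_alt (path : List String) : Bool :=
  tmvLoop path PySem.Set.empty false

-- ===== PRECONDITION & SPEC =====
def Spec_too_many_visits (path : List String) (out : Bool) : Prop := out = too_many_visits_alt path
instance (path : List String) (out : Bool) : Decidable (Spec_too_many_visits path out) := by unfold Spec_too_many_visits; infer_instance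

-- ===== CLAIM =====
def Claim_equal_too_many_visits : Prop := ∀ (path : List String), Dom_too_many_visits path → Spec_too_many_visits path (too_many_visits path)

-- ===== LEMMAS AND PROOFS =====

-- number of "repeat events" the loop sees: lowercase occurrences already in the evolving seen-set
def tmvExcess : List String → PySem.Set String → Nat
  | [], _ => 0
  | p :: rest, seen =>
    if pyStrIslower p then
      if p ∈ seen then tmvExcess rest seen + 1
      else tmvExcess rest (PySem.Set.add seen p)
    else tmvExcess rest seen

lemma tmvLoop_iff (l : List String) (seen : PySem.Set String) (spare : Bool) :
    tmvLoop l seen spare = true ↔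
      (2 ≤ l.count "start" + (if "start" ∈ seen then 1 else 0)
       ∨ 2 ≤ l.count "end" + (if "end" ∈ seen then 1 else 0)
       ∨ 2 ≤ tmvExcess l seen + (if spare then 1 else 0)) := by
  induction l generalizing seen spare with
  | nil =>
    simp only [tmvLoop, tmvExcess, List.count_nil, Bool.false_eq_true, false_iff]
    push Not
    refine ⟨?_, ?_, ?_⟩ <;> split_ifs <;> omega
  | cons p rest ih =>
    by_cases hlow : pyStrIslower p = true
    · by_cases hmem : p ∈ seen
      · have hstep : tmvLoop (p :: rest) seen spare
            = (if p == "start" || p == "end" || spare then true else tmvLoop rest seen true) := by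
          simp only [tmvLoop, hlow, if_true]
          rw [if_neg (not_not_intro hmem)]
        have hexc : tmvExcess (p :: rest) seen = tmvExcess rest seen + 1 := by
          simp only [tmvExcess, hlow, if_true, if_pos hmem]
        rw [hstep, hexc]
        by_cases hs : p = "start"
        · subst hs
          rw [if_pos (by simp)]
          refine iff_of_true rfl (Or.inl ?_)
          simp only [List.count_cons, if_pos hmem, beq_self_eq_true, if_true]
          omega
        · by_cases he : p = "end"
          · subst he
            rw [if_pos (by simp)]
            refine iff_of_true rfl (Or.inr (Or.inl ?_))
            simp only [List.count_cons, if_pos hmem, beq_self_eq_true, if_true]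
            omega
          · cases spare with
            | true =>
              rw [if_pos (by simp)]
              refine iff_of_true rfl (Or.inr (Or.inr ?_))
              rw [if_pos rfl]
              omega
            | false =>
              rw [if_neg (by simp [hs, he]), ih]
              simp only [List.count_cons, beq_iff_eq, if_neg hs, if_neg he, add_zero,
                Bool.false_eq_true, if_false, if_true]
      · have hstep : tmvLoop (p :: rest) seen spare = tmvLoop rest (PySem.Set.add seen p) spare := by
          simp only [tmvLoop, hlow, if_true]
          rw [if_pos hmem]
        have hexc : tmvExcess (p :: rest) seen = tmvExcess rest (PySem.Set.add seen p) := by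
          simp only [tmvExcess, hlow, if_true, if_neg hmem]
        have hst : ("start" ∈ PySem.Set.add seen p) ↔ (p = "start" ∨ "start" ∈ seen) := by
          rw [PySem.Set.mem_add]; tauto
        have hen : ("end" ∈ PySem.Set.add seen p) ↔ (p = "end" ∨ "end" ∈ seen) := by
          rw [PySem.Set.mem_add]; tauto
        have e1 : (if "start" ∈ PySem.Set.add seen p then (1:Nat) else 0)
            = (if p = "start" then 1 else 0) + (if "start" ∈ seen then 1 else 0) := by
          by_cases hsp : p = "start"
          · rw [if_pos (hst.mpr (Or.inl hsp)), if_pos hsp,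
              if_neg (fun h => hmem (hsp.symm ▸ h)), Nat.add_zero]
          · rw [if_neg hsp, Nat.zero_add]
            by_cases hse : "start" ∈ seen
            · rw [if_pos hse, if_pos (hst.mpr (Or.inr hse))]
            · rw [if_neg hse, if_neg (by
                rw [hst]
                rintro (h | h)
                · exact hsp h
                · exact hse h)]
        have e2 : (if "end" ∈ PySem.Set.add seen p then (1:Nat) else 0)
            = (if p = "end" then 1 else 0) + (if "end" ∈ seen then 1 else 0) := by
          by_cases hsp : p = "end"
          · rw [if_pos (hen.mpr (Or.inl hsp)), if_pos hsp,
              if_neg (fun h => hmem (hsp.symm ▸ h)), Nat.add_zero]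
          · rw [if_neg hsp, Nat.zero_add]
            by_cases hse : "end" ∈ seen
            · rw [if_pos hse, if_pos (hen.mpr (Or.inr hse))]
            · rw [if_neg hse, if_neg (by
                rw [hen]
                rintro (h | h)
                · exact hsp h
                · exact hse h)]
        rw [hstep, hexc, ih, e1, e2]
        simp only [List.count_cons, beq_iff_eq]
        omega
    · have hs' : ¬ (p = "start") := fun h => hlow (h ▸ (by decide : pyStrIslower "start" = true))
      have he' : ¬ (p = "end") := fun h => hlow (h ▸ (by decide : pyStrIslower "end" = true))
      have hstep : tmvLoop (p :: rest) seen spare = tmvLoop rest seen spare := by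
        simp only [tmvLoop, hlow, Bool.false_eq_true, if_false]
      have hexc : tmvExcess (p :: rest) seen = tmvExcess rest seen := by
        simp only [tmvExcess, hlow, Bool.false_eq_true, if_false]
      rw [hstep, hexc, ih]
      simp only [List.count_cons, beq_iff_eq, if_neg hs', if_neg he', add_zero]

lemma tmvExcess_add_length (l : List String) (seen : PySem.Set String) :
    tmvExcess l seen + ((l.filter (fun p => pyStrIslower p)).foldl PySem.Set.add seen).length
      = (l.filter (fun p => pyStrIslower p)).length + seen.length := by
  induction l generalizing seen with
  | nil => simp [tmvExcess]
  | cons p rest ih =>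
    by_cases hlow : pyStrIslower p = true
    · by_cases hmem : p ∈ seen
      · have hadd : PySem.Set.add seen p = seen := PySem.Set.add_of_mem hmem
        simp only [tmvExcess, hlow, if_true, hmem, List.filter_cons, List.foldl_cons, hadd]
        have := ih seen
        simp only [List.length_cons]
        omega
      · have hadd : PySem.Set.add seen p = seen ++ [p] := PySem.Set.add_of_not_mem hmem
        simp only [tmvExcess, hlow, if_true, hmem, if_false, List.filter_cons, List.foldl_cons]
        have := ih (PySem.Set.add seen p)
        have hlen : (PySem.Set.add seen p).length = seen.length + 1 := by
          rw [hadd]; simp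
        simp only [List.length_cons]
        omega
    · have hexc : tmvExcess (p :: rest) seen = tmvExcess rest seen := by
        simp only [tmvExcess, hlow, Bool.false_eq_true, if_false]
      have hfil : (p :: rest).filter (fun p => pyStrIslower p)
          = rest.filter (fun p => pyStrIslower p) := by
        simp [hlow]
      rw [hexc, hfil]
      exact ih seen

theorem too_many_visits_spec : Claim_equal_too_many_visits := by
  intro path _
  unfold Spec_too_many_visits
  rw [Bool.eq_iff_iff]
  set small := path.filter (fun p => pyStrIslower p) with hsmall
  have hA : too_many_visits path = true ↔
      (1 < path.count "start" ∨ 1 < path.count "end"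
        ∨ (PySem.Set.ofList small).length + 1 < small.length) := by
    unfold too_many_visits
    rw [PySem.List.count_eq, PySem.List.count_eq]
    split_ifs with h1 h2 _ <;> simp_all
    omega
  have hB : too_many_visits_alt path = true ↔
      (2 ≤ path.count "start" ∨ 2 ≤ path.count "end"
        ∨ 2 ≤ tmvExcess path PySem.Set.empty) := by
    unfold too_many_visits_alt
    rw [tmvLoop_iff]
    simp [PySem.Set.empty]
  have hEx : tmvExcess path PySem.Set.empty + (PySem.Set.ofList small).length
      = small.length := by
    have := tmvExcess_add_length path PySem.Set.empty
    rw [PySem.Set.ofList_eq_foldl]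
    simpa [PySem.Set.empty, hsmall] using this
  rw [hA, hB]
  omega
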